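-- pv_equiv track=rewrite | github.com/moazhamza/advent-of-code | 2023/day_3/day_3.py | replace_single_digits
-- ===== SOURCE A (Python) =====
-- def replace_single_digits(line):
--     current_int = {"number": "", "idxs": []}
--     for x in range(len(line)):
--         if line[x].isdigit():
--             current_int["number"] += line[x]
--             current_int["idxs"].append(x)
--         else:
--             if current_int["number"]:
--                 for idx in current_int["idxs"]:
--                     line[idx] = current_int["number"]
--                 current_int = {"number": "", "idxs": []}
--
--     if current_int["number"]:
--         for idx in current_int["idxs"]:
--             line[idx] = current_int["number"]
--     return line
-- ===== SOURCE B (Python) =====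
-- def replace_single_digits(line):
--     i = 0
--     n = len(line)
--     while i < n:
--         if not line[i].isdigit():
--             i += 1
--             continue
--         j = i
--         while j < n and line[j].isdigit():
--             j += 1
--         num = ''.join(line[i:j])
--         for k in range(i, j):
--             line[k] = num
--         i = j
--     return line
-- ===== Notes on version B (the rewrite author's own statement) =====
-- stated objective: simpler
-- what changed: Replaced the stateful accumulator-dict scan (pending number string plus index list, flushed on non-digit and again after the loop) by index-jumping run detection: find each maximal digit run [i,j) in one inner scan, join the slice once and assign it to every position of the run, with no trailing-run special case.
import Mathlib
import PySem

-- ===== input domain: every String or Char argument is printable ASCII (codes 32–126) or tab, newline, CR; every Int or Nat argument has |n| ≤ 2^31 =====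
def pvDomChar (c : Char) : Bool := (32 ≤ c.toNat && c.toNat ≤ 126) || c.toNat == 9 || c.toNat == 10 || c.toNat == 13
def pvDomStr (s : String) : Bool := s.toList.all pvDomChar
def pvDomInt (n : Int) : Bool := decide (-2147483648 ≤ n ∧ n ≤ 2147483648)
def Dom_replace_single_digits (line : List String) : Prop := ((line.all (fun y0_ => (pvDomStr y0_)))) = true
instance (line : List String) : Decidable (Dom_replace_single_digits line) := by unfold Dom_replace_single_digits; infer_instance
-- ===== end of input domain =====

-- ===== PORT A =====
-- B reorganises A's accumulator-dict scan into index-jumping digit-run detection (objective: simpler).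
-- Both Pythons mutate `line` in place and return it; the equivalence proved here is about the return value.
-- flush: `for idx in current_int["idxs"]: line[idx] = current_int["number"]`
def pvFlush (num : String) (idxs : List Nat) (cur : List String) : List String :=
  idxs.foldl (fun l i => l.set i num) cur

-- one iteration of A's `for x in range(len(line))` loop over state (line, number, idxs)
def pvStep (st : List String × String × List Nat) (x : Nat) : List String × String × List Nat :=
  if PySem.Str.strIsdigit (st.1.getD x "") then
    (st.1, st.2.1 ++ st.1.getD x "", st.2.2 ++ [x])
  else
    if st.2.1 ≠ "" then (pvFlush st.2.1 st.2.2 st.1, "", [])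
    else st

def replace_single_digits (line : List String) : List String :=
  let st := (List.range line.length).foldl pvStep (line, "", [])
  if st.2.1 ≠ "" then pvFlush st.2.1 st.2.2 st.1 else st.1

-- ===== PORT B =====
-- B's outer while-loop over the index i; the inner `while j < n and line[j].isdigit()` scan is the
-- takeWhile/dropWhile split of the suffix, `''.join(line[i:j])` is the join of the run, and the
-- `for k in range(i, j)` assignments produce the replicated block.
def pvGo : List String → List String
  | [] => []
  | s :: rest =>
    if PySem.Str.strIsdigit s then
      let run := s :: rest.takeWhile (fun u => PySem.Str.strIsdigit u)
      let num := PySem.Str.join "" run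
      List.replicate run.length num ++ pvGo (rest.dropWhile (fun u => PySem.Str.strIsdigit u))
    else s :: pvGo rest
termination_by l => l.length
decreasing_by
  · simpa using Nat.lt_succ_of_le (List.length_dropWhile_le (fun u => PySem.Str.strIsdigit u) rest)
  · simp

def replace_single_digits_alt (line : List String) : List String := pvGo line

-- ===== PRECONDITION & SPEC =====
def Spec_replace_single_digits (line : List String) (out : List String) : Prop := out = replace_single_digits_alt line
instance (line : List String) (out : List String) : Decidable (Spec_replace_single_digits line out) := by unfold Spec_replace_single_digits; infer_instance

-- ===== CLAIM (what is proved, stated in full; the proofs are below) =====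
def Claim_equal_replace_single_digits : Prop := ∀ (line : List String), Dom_replace_single_digits line → Spec_replace_single_digits line (replace_single_digits line)

-- ===== LEMMAS AND PROOFS =====

lemma pv_join_nil : PySem.Str.join "" [] = "" := rfl

-- a Python-digit string is nonempty
lemma pv_digit_ne_empty {s : String} (h : PySem.Str.strIsdigit s = true) : s ≠ "" := by
  intro hs; subst hs; simp [PySem.Chars.strIsdigit] at h

lemma pv_append_ne {a b : String} (h : b ≠ "") : a ++ b ≠ "" := by
  intro hab
  apply h
  apply String.toList_inj.mp
  have := congrArg String.toList hab
  simp [String.toList_append] at this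
  simp [this.2]

lemma pv_join_snoc (l : List String) (s : String) :
    PySem.Str.join "" (l ++ [s]) = PySem.Str.join "" l ++ s := by
  apply String.toList_inj.mp
  simp only [PySem.Str.join, PySem.Chars.join, String.toList_append, String.toList_ofList,
    List.map_append, List.map_cons, List.map_nil]
  induction l with
  | nil => simp [List.intercalate]
  | cons a l ihl => cases l <;> simp_all [List.intercalate, List.intersperse]

-- writing `num` at the consecutive indices range' j m replaces that block
lemma pv_flush_range' (num : String) :
    ∀ (m j : Nat) (cur : List String), j + m ≤ cur.length →
      pvFlush num (List.range' j m) cur = cur.take j ++ List.replicate m num ++ cur.drop (j + m) := by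
  intro m
  induction m with
  | zero => intro j cur h; simp [pvFlush]
  | succ m ih =>
    intro j cur h
    have hj : j < cur.length := by omega
    have hstep : pvFlush num (List.range' j (m + 1)) cur
        = pvFlush num (List.range' (j + 1) m) (cur.set j num) := by
      simp [pvFlush, List.range'_succ]
    rw [hstep, ih (j + 1) (cur.set j num) (by simp; omega)]
    have hset : cur.set j num = cur.take j ++ num :: cur.drop (j + 1) := by
      rw [List.set_eq_take_append_cons_drop, if_pos hj]
    have htk : (cur.set j num).take (j + 1) = cur.take j ++ [num] := by
      rw [hset]
      have : j + 1 = (cur.take j).length + 1 := by simp; omega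
      rw [this, List.take_length_add_append]
      simp
    have hdp : (cur.set j num).drop (j + 1 + m) = cur.drop (j + (m + 1)) := by
      rw [List.drop_set_of_lt (by omega)]
      congr 1; omega
    rw [htk, hdp]
    simp [List.replicate_succ]

-- pvGo on a maximal nonempty digit run followed by a non-digit (or nothing)
lemma pv_go_run (run t : List String) (h0 : run ≠ [])
    (hall : ∀ s ∈ run, PySem.Str.strIsdigit s = true)
    (ht : t.takeWhile (fun u => PySem.Str.strIsdigit u) = []) :
    pvGo (run ++ t) = List.replicate run.length (PySem.Str.join "" run) ++ pvGo t := by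
  match run with
  | [] => exact absurd rfl h0
  | r0 :: rr =>
    have hr0 : PySem.Str.strIsdigit r0 = true := hall r0 (by simp)
    have hrr : ∀ s ∈ rr, PySem.Str.strIsdigit s = true := fun s hs => hall s (by simp [hs])
    have htake : (rr ++ t).takeWhile (fun u => PySem.Str.strIsdigit u) = rr ++ [] := by
      rw [List.takeWhile_append_of_pos hrr, ht]
    have hdrop : (rr ++ t).dropWhile (fun u => PySem.Str.strIsdigit u) = t := by
      rw [List.dropWhile_append_of_pos hrr]
      have := List.takeWhile_append_dropWhile (p := fun u => PySem.Str.strIsdigit u) (l := t)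
      rw [ht] at this; simpa using this
    simp only [List.cons_append, pvGo, hr0, if_pos, htake, hdrop, List.append_nil]

-- pvGo steps over a leading non-digit element
lemma pv_go_cons_nondigit {s : String} (h : PySem.Str.strIsdigit s = false) (t : List String) :
    pvGo (s :: t) = s :: pvGo t := by
  have h' : PySem.Chars.strIsdigit s.toList = false := by simpa using h
  simp [pvGo, h']

-- the list element A's loop reads at index k
lemma pv_getD_of_drop {cur t : List String} {s : String} {k : Nat}
    (h : cur.drop k = s :: t) : cur.getD k "" = s := by
  have : cur[k]? = some s := by
    have h0 : (cur.drop k)[0]? = some s := by rw [h]; rfl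
    rw [List.getElem?_drop] at h0; simpa using h0
  simp [List.getD, this]

-- MAIN INVARIANT: A's loop from position k, with a pending all-digit run of length m ending at k,
-- followed by the final flush, equals the processed prefix plus pvGo of (pending run ++ remaining suffix).
lemma pv_loop (t : List String) :
    ∀ (cur : List String) (k m : Nat) (num : String),
      m ≤ k → k + t.length = cur.length → cur.drop k = t →
      (∀ s ∈ (cur.drop (k - m)).take m, PySem.Str.strIsdigit s = true) →
      num = PySem.Str.join "" ((cur.drop (k - m)).take m) →
      (num = "" ↔ m = 0) →
      (let st := (List.range' k t.length).foldl pvStep (cur, num, List.range' (k - m) m)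
       if st.2.1 ≠ "" then pvFlush st.2.1 st.2.2 st.1 else st.1)
      = cur.take (k - m) ++ pvGo ((cur.drop (k - m)).take m ++ t) := by
  induction t with
  | nil =>
    intro cur k m num hmk hlen hdrop hall hnum hiff
    have hk : k = cur.length := by simpa using hlen
    have hrunlen : ((cur.drop (k - m)).take m).length = m := by simp; omega
    by_cases hm : m = 0
    · subst hm
      have hnum0 : num = "" := hiff.mpr rfl
      subst hnum0
      simp only [List.range', List.foldl_nil, List.length_nil, ne_eq,
        not_true_eq_false]
      simp [pvGo, List.take_of_length_le (Nat.le_of_eq hk.symm)]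
    · have hnumne : num ≠ "" := fun h => hm (hiff.mp h)
      simp only [List.length_nil, List.range', List.foldl_nil]
      rw [if_pos hnumne]
      have hflush := pv_flush_range' num m (k - m) cur (by omega)
      have hkm : k - m + m = k := by omega
      rw [hkm] at hflush
      rw [hflush]
      have hrun0 : (cur.drop (k - m)).take m ≠ [] := by
        intro h; rw [h] at hrunlen; simp at hrunlen; omega
      have hgo : pvGo ((cur.drop (k - m)).take m) = List.replicate m num := by
        have hg := pv_go_run _ [] hrun0 hall (by simp)
        simp only [List.append_nil] at hg
        rw [hg, hrunlen, ← hnum]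
        simp [pvGo]
      rw [List.append_nil, hgo, hdrop]
      simp
  | cons s t' ih =>
    intro cur k m num hmk hlen hdrop hall hnum hiff
    have hklen : k < cur.length := by simp at hlen; omega
    have hs : cur.getD k "" = s := pv_getD_of_drop hdrop
    have hdrop' : cur.drop (k + 1) = t' := by
      have : cur.drop (k + 1) = (cur.drop k).drop 1 := by
        rw [List.drop_drop]
      rw [this, hdrop]; rfl
    have hkm : k - m + m = k := by omega
    have hcurk : cur[k]? = some s := by
      have h0 : (cur.drop k)[0]? = some s := by rw [hdrop]; rfl
      rw [List.getElem?_drop] at h0; simpa using h0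
    simp only [List.length_cons, List.range'_succ, List.foldl_cons]
    by_cases hd : PySem.Str.strIsdigit s = true
    · -- digit: extend the pending run
      have hidx : List.range' (k - m) m ++ [k] = List.range' (k - m) (m + 1) := by
        rw [List.range'_1_concat, hkm]
      have hstep : pvStep (cur, num, List.range' (k - m) m) k
          = (cur, num ++ s, List.range' (k - m) (m + 1)) := by
        simp only [pvStep, hs, hd]
        rw [hidx]
        simp
      rw [hstep]
      have hrun' : (cur.drop (k - m)).take (m + 1)
          = (cur.drop (k - m)).take m ++ [s] := by
        rw [List.take_add_one]
        have : (cur.drop (k - m))[m]? = some s := by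
          rw [List.getElem?_drop, hkm, hcurk]
        simp [this]
      have := ih cur (k + 1) (m + 1) (num ++ s) (by omega)
        (by simp at hlen ⊢; omega) hdrop'
        (by
          intro u hu
          rw [show k + 1 - (m + 1) = k - m by omega, hrun'] at hu
          rcases List.mem_append.mp hu with h | h
          · exact hall u h
          · simp at h; subst h; exact hd)
        (by rw [show k + 1 - (m + 1) = k - m by omega, hrun', pv_join_snoc, ← hnum])
        (by
          constructor
          · intro h; exact absurd h (pv_append_ne (pv_digit_ne_empty hd))
          · omega)
      rw [show k + 1 - (m + 1) = k - m by omega] at this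
      rw [this, hrun']
      simp
    · -- non-digit
      have hdf : PySem.Str.strIsdigit s = false := by simpa using hd
      by_cases hnumne : num = ""
      · -- no pending run
        have hm0 : m = 0 := hiff.mp hnumne
        subst hm0; subst hnumne
        have hstep : pvStep (cur, "", List.range' (k - 0) 0) k = (cur, "", List.range' (k + 1 - 0) 0) := by
          simp only [pvStep, hs, hdf]
          simp
        rw [hstep]
        have hih := ih cur (k + 1) 0 "" (by omega) (by simp at hlen ⊢; omega) hdrop'
          (by simp) (by rw [List.take_zero]; exact pv_join_nil.symm) (by simp)
        simp only [Nat.sub_zero] at hih ⊢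
        rw [hih]
        have htk : cur.take (k + 1) = cur.take k ++ [s] := by
          rw [List.take_add_one, hcurk]; rfl
        rw [htk, hdrop', hdrop]
        simp only [List.take_zero, List.nil_append]
        rw [pv_go_cons_nondigit hdf]
        simp
      · -- pending run: flush it
        have hm : m ≠ 0 := fun h => hnumne (hiff.mpr h)
        have hstep : pvStep (cur, num, List.range' (k - m) m) k
            = (pvFlush num (List.range' (k - m) m) cur, "", List.range' (k + 1 - 0) 0) := by
          simp only [pvStep, hs, hdf]
          simp [hnumne]
        rw [hstep]
        simp only [Nat.sub_zero]
        have hflush := pv_flush_range' num m (k - m) cur (by omega)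
        rw [hkm] at hflush
        set P : List String := cur.take (k - m) ++ List.replicate m num with hP
        have hPlen : P.length = k := by simp [hP]; omega
        have hcur' : pvFlush num (List.range' (k - m) m) cur = P ++ cur.drop k := by
          rw [hflush]
        rw [hcur']
        have hdropc : P ++ cur.drop k = P ++ s :: t' := by rw [hdrop]
        rw [hdropc]
        have hlen' : (P ++ s :: t').length = cur.length := by
          simp [hPlen]; simp at hlen; omega
        have hdrop'' : (P ++ s :: t').drop (k + 1) = t' := by
          have : k + 1 = P.length + 1 := by omega
          rw [this, List.drop_length_add_append]; rfl
        have hih := ih (P ++ s :: t') (k + 1) 0 "" (by omega)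
          (by simp at hlen' ⊢; omega) hdrop''
          (by simp) (by rw [List.take_zero]; exact pv_join_nil.symm) (by simp)
        simp only [Nat.sub_zero] at hih
        rw [hih]
        have htk : (P ++ s :: t').take (k + 1) = P ++ [s] := by
          have he : k + 1 = P.length + 1 := by omega
          rw [he, List.take_length_add_append]; rfl
        rw [htk, hdrop'']
        simp only [List.take_zero, List.nil_append]
        have hrunlen : ((cur.drop (k - m)).take m).length = m := by simp; omega
        have hrun0 : (cur.drop (k - m)).take m ≠ [] := by
          intro h; rw [h] at hrunlen; simp at hrunlen; omega
        have hdf' : PySem.Chars.strIsdigit s.toList = false := by simpa using hdf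
        rw [pv_go_run _ (s :: t') hrun0 hall (by simp [List.takeWhile, hdf']),
          pv_go_cons_nondigit hdf, hrunlen, ← hnum, hP]
        simp

-- ===== VERDICT (by name: the statement is the Claim_ definition above) =====
theorem replace_single_digits_spec : Claim_equal_replace_single_digits := by
  intro line _
  unfold Spec_replace_single_digits replace_single_digits replace_single_digits_alt
  have h := pv_loop line line 0 0 "" (by omega) (by simp) (by simp)
    (by simp) (by rw [List.take_zero]; exact pv_join_nil.symm) (by simp)
  simp only [List.take, List.nil_append, List.range'] at h
  rw [List.range_eq_range']
  simpa using h
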